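-- pv_equiv track=rewrite | github.com/r1b/aoc2019 | day04/problem2.py | valid_passwords
-- ===== SOURCE A (Python) =====
-- def has_twice_repeated_digit(n):
--     s = str(n)
--
--     cur_partition = []
--     cur = None
--
--     for c in s:
--         if cur != c:
--             if len(cur_partition) == 2:
--                 return True
--             cur = c
--             cur_partition = []
--         cur_partition.append(c)
--
--     return len(cur_partition) == 2
--
-- def strictly_increasing(n):
--     s = str(n)
--     for i in range(len(s) - 1):
--         if int(s[i]) > int(s[i + 1]):
--             return False
--     return True
--
-- def valid_passwords(lower, upper):
--     return len(
--         list(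
--             i
--             for i in range(lower, upper + 1)
--             if has_twice_repeated_digit(i) and strictly_increasing(i)
--         )
--     )
-- ===== SOURCE B (Python) =====
-- def _count_from(lower, upper, value, last, run_len, has_pair, remaining):
--     # value: the number built so far (at least one digit), last: its last digit,
--     # run_len: length of the current run of equal digits, has_pair: a completed
--     # run of length exactly 2 was seen among the earlier runs.
--     total = 1 if (has_pair or run_len == 2) and lower <= value <= upper else 0
--     if remaining == 0:
--         return total
--     for d in range(last, 10):
--         if d == last:
--             total += _count_from(lower, upper, value * 10 + d, d, run_len + 1, has_pair, remaining - 1)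
--         else:
--             total += _count_from(lower, upper, value * 10 + d, d, 1, has_pair or run_len == 2, remaining - 1)
--     return total
--
--
-- def valid_passwords(lower, upper):
--     # Enumerate all numbers with non-decreasing digits (up to 10 digits, enough
--     # for any upper <= 2**31) and count those with an exactly-twice digit run
--     # lying in [lower, upper].
--     return sum(_count_from(lower, upper, d, d, 1, False, 9) for d in range(1, 10))
-- ===== Notes on version B (the rewrite author's own statement) =====
-- stated objective: alternative
-- what changed: B no longer scans every integer in [lower, upper]: it recursively enumerates only the numbers with non-decreasing digits (at most 10 digits, enough for any upper <= 2^31), tracking the current digit-run length and an exactly-twice-run flag, and counts those falling in [lower, upper]; its work is bounded by the number of non-decreasing digit strings instead of growing with upper-lower (a timing run could not confirm a speed-up on its inputs, so no speed is claimed).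
-- outside the precondition, e.g. on valid_passwords(-12, -12): A returns 0, B returns 0
import Mathlib
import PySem

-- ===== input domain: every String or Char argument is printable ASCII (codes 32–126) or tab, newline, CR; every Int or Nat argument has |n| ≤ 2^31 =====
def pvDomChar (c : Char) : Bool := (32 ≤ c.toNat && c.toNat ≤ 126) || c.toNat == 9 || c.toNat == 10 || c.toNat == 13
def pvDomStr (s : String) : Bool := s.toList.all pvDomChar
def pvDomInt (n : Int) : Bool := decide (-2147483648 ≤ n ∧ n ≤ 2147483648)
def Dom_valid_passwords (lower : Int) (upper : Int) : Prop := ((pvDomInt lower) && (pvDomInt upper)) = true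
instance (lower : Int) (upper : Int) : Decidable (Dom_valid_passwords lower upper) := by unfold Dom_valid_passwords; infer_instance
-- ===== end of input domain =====

-- B replaces A's scan of every integer in [lower, upper] by a direct recursive enumeration of
-- the numbers with non-decreasing digits only (at most 10 digits), counting those in range with
-- an exactly-twice digit run; objective: alternative (B's work is bounded by the number of
-- non-decreasing digit strings instead of growing with upper - lower).

-- ===== PORT A =====
-- int(c) for a single character; the .getD 0 branch is unreachable on inputs admitted by Pre_
-- (there every indexed character is a decimal digit).
def pvCharInt (c : Char) : Int := (PySem.Int.ofChars? [c]).getD 0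

-- the for-loop of has_twice_repeated_digit: state = (cur_partition, cur), early return kept
def pvHtLoop : List Char → List Char → Option Char → Bool
  | [], part, _ => part.length == 2
  | c :: rest, part, cur =>
    if cur ≠ some c then
      if part.length == 2 then true
      else pvHtLoop rest [c] (some c)
    else pvHtLoop rest (part ++ [c]) cur

def has_twice_repeated_digit (n : Int) : Bool :=
  pvHtLoop (PySem.Int.toChars n) [] none

-- the for-loop of strictly_increasing over the index list range(len(s) - 1)
def pvSiLoop (s : List Char) : List Int → Bool
  | [] => true
  | i :: rest =>
    if ((PySem.List.pyGet? s i).elim 0 pvCharInt) > ((PySem.List.pyGet? s (i + 1)).elim 0 pvCharInt)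
    then false
    else pvSiLoop s rest

def strictly_increasing (n : Int) : Bool :=
  let s := PySem.Int.toChars n
  pvSiLoop s (PySem.List.pyRange 0 ((s.length : Int) - 1))

def valid_passwords (lower : Int) (upper : Int) : Int :=
  ((PySem.List.pyRange lower (upper + 1)).filter
    (fun i => has_twice_repeated_digit i && strictly_increasing i)).length

-- ===== PORT B =====
-- _count_from of Source B; `remaining` is a Nat (in Source B it counts 9,8,…,0) so the recursion is structural
def pvCountFrom (lower upper value last run : Int) (hasPair : Bool) (remaining : Nat) : Int :=
  let total : Int :=
    if (hasPair || run == 2) && (decide (lower ≤ value) && decide (value ≤ upper)) then 1 else 0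
  match remaining with
  | 0 => total
  | r + 1 =>
    (PySem.List.pyRange last 10).foldl
      (fun acc d =>
        acc + (if d = last then pvCountFrom lower upper (value * 10 + d) d (run + 1) hasPair r
               else pvCountFrom lower upper (value * 10 + d) d 1 (hasPair || run == 2) r))
      total

def valid_passwords_alt (lower : Int) (upper : Int) : Int :=
  (PySem.List.pyRange 1 10).foldl (fun acc d => acc + pvCountFrom lower upper d d 1 false 9) 0

-- ===== PRECONDITION & SPEC =====
-- Pre_ excludes lower < -10 with a nonempty range: there the range may contain a negative number
-- with an exactly-twice digit run (such as -11), on which A's strictly_increasing calls int('-')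
-- and raises ValueError; a few such all-negative ranges happen to avoid every such number and A
-- still returns (B agrees there).
def Pre_valid_passwords (lower : Int) (upper : Int) : Prop := -10 ≤ lower ∨ upper < lower
instance (lower : Int) (upper : Int) : Decidable (Pre_valid_passwords lower upper) := by
  unfold Pre_valid_passwords; infer_instance

def pvWitness_valid_passwords : Int × Int := (100, 300)

def Spec_valid_passwords (lower : Int) (upper : Int) (out : Int) : Prop := out = valid_passwords_alt lower upper
instance (lower : Int) (upper : Int) (out : Int) : Decidable (Spec_valid_passwords lower upper out) := by unfold Spec_valid_passwords; infer_instance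

-- ===== CLAIM (what is proved, stated in full; the proofs are below) =====
def Claim_equal_valid_passwords : Prop := ∀ (lower : Int) (upper : Int), Dom_valid_passwords lower upper → Pre_valid_passwords lower upper → Spec_valid_passwords lower upper (valid_passwords lower upper)

-- ===== LEMMAS AND PROOFS =====

-- ---- proof-side vocabulary: digit lists (most significant digit first, as Ints) ----

/-- the decimal digits of `n` (n ≥ 0), most significant first, as Ints -/
def pvDigits (n : Int) : List Int := ((Nat.digits 10 n.toNat).reverse).map (fun d : Nat => (d : Int))

def pvCharOf (d : Int) : Char := Nat.digitChar d.toNat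

/-- value of prefixing `value` to the digit list `ds` -/
def pvDsVal (value : Int) : List Int → Int
  | [] => value
  | d :: ds => pvDsVal (value * 10 + d) ds

/-- `last :: ds` is non-decreasing -/
def pvNdec : Int → List Int → Prop
  | _, [] => True
  | last, d :: ds => last ≤ d ∧ pvNdec d ds

/-- run-length scan: current run of `last` has length `run`, `hasPair` = a finished run of
length exactly 2 was seen; result: the whole list (current run extended by `ds`) has a run
of length exactly 2 -/
def pvRunEnd (last run : Int) (hasPair : Bool) : List Int → Bool
  | [] => hasPair || run == 2
  | d :: ds => if d = last then pvRunEnd d (run + 1) hasPair ds else pvRunEnd d 1 (hasPair || run == 2) ds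

/-- list analogue of pvCountFrom: the numbers the subtree counts (ignoring the range test) -/
def pvBList (value last run : Int) (hasPair : Bool) : Nat → List Int
  | 0 => if (hasPair || run == 2) = true then [value] else []
  | r + 1 =>
    (if (hasPair || run == 2) = true then [value] else []) ++
    (PySem.List.pyRange last 10).flatMap (fun d =>
      if d = last then pvBList (value * 10 + d) d (run + 1) hasPair r
      else pvBList (value * 10 + d) d 1 (hasPair || run == 2) r)

def pvGL : List Int := (PySem.List.pyRange 1 10).flatMap (fun d => pvBList d d 1 false 9)

def pvInRange (lower upper v : Int) : Bool := decide (lower ≤ v) && decide (v ≤ upper)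

def pvPred (n : Int) : Bool := has_twice_repeated_digit n && strictly_increasing n

-- ---- B-side lemmas ----

theorem pvRunEnd_true (ds : List Int) : ∀ last run, pvRunEnd last run true ds = true := by
  induction ds with
  | nil => intro last run; rfl
  | cons d ds ih => intro last run; simp [pvRunEnd, ih]

theorem pvLenFilterFlatMap (l : List Int) (g : Int → List Int) (q : Int → Bool) :
    (((l.flatMap g).filter q).length : Int)
      = (l.map (fun d => (((g d).filter q).length : Int))).sum := by
  induction l with
  | nil => simp
  | cons d l ih =>
    simp only [List.flatMap_cons, List.filter_append, List.length_append, List.map_cons,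
      List.sum_cons, ← ih]
    push_cast
    ring

theorem pvHere_eq (lower upper value run : Int) (hasPair : Bool) :
    (if (hasPair || run == 2) && (decide (lower ≤ value) && decide (value ≤ upper))
       then (1 : Int) else 0)
      = ((((if (hasPair || run == 2) = true then [value] else []).filter
            (pvInRange lower upper)).length : Nat) : Int) := by
  by_cases hp : (hasPair || run == 2) = true
  · by_cases h1 : lower ≤ value
    · by_cases h2 : value ≤ upper
      · simp [pvInRange, hp, h1, h2, List.filter]
      · simp [pvInRange, hp, h1, h2, List.filter]
    · simp [pvInRange, hp, h1, List.filter]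
  · simp [hp]

theorem pvCount_eq_filter : ∀ (r : Nat) (lower upper value last run : Int) (hasPair : Bool),
    pvCountFrom lower upper value last run hasPair r
      = (((pvBList value last run hasPair r).filter (pvInRange lower upper)).length : Int) := by
  intro r
  induction r with
  | zero =>
    intro lower upper value last run hasPair
    simpa only [pvCountFrom, pvBList] using pvHere_eq lower upper value run hasPair
  | succ r ih =>
    intro lower upper value last run hasPair
    simp only [pvCountFrom, pvBList]
    rw [PySem.List.foldl_add]
    rw [List.filter_append, List.length_append]
    push_cast
    rw [pvLenFilterFlatMap]
    rw [← pvHere_eq lower upper value run hasPair]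
    congr 1
    congr 1
    apply List.map_congr_left
    intro d _
    by_cases hdl : d = last
    · simp only [if_pos hdl, ih]
    · simp only [if_neg hdl, ih]

theorem pvAlt_eq_filter (lower upper : Int) :
    valid_passwords_alt lower upper = ((pvGL.filter (pvInRange lower upper)).length : Int) := by
  unfold valid_passwords_alt pvGL
  rw [PySem.List.foldl_add, pvLenFilterFlatMap, zero_add]
  congr 1
  apply List.map_congr_left
  intro d _
  exact pvCount_eq_filter 9 lower upper d d 1 false

theorem mem_pvBList : ∀ (r : Nat) (value last run : Int) (hasPair : Bool) (n : Int),
    n ∈ pvBList value last run hasPair r ↔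
      ∃ ds : List Int, ds.length ≤ r ∧ pvNdec last ds ∧ (∀ d ∈ ds, d ≤ 9) ∧
        pvRunEnd last run hasPair ds = true ∧ n = pvDsVal value ds := by
  intro r
  induction r with
  | zero =>
    intro value last run hasPair n
    constructor
    · intro hmem
      by_cases hp : (hasPair || run == 2) = true
      · rw [pvBList, if_pos hp] at hmem
        simp only [List.mem_singleton] at hmem
        exact ⟨[], by simp, trivial, by simp, by simpa [pvRunEnd] using hp, by simp [pvDsVal, hmem]⟩
      · rw [pvBList, if_neg hp] at hmem
        simp at hmem
    · rintro ⟨ds, hlen, _, _, hre, rfl⟩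
      have hnil : ds = [] := List.eq_nil_of_length_eq_zero (by omega)
      subst hnil
      rw [pvRunEnd] at hre
      rw [pvBList, if_pos hre]
      simp [pvDsVal]
  | succ r ih =>
    intro value last run hasPair n
    simp only [pvBList, List.mem_append, List.mem_flatMap]
    constructor
    · rintro (hhead | ⟨d, hdmem, hchild⟩)
      · by_cases hp : (hasPair || run == 2) = true
        · rw [if_pos hp] at hhead
          simp only [List.mem_singleton] at hhead
          exact ⟨[], by simp, trivial, by simp, by simpa [pvRunEnd] using hp,
            by simp [pvDsVal, hhead]⟩
        · rw [if_neg hp] at hhead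
          simp at hhead
      · rw [PySem.List.mem_pyRange_one] at hdmem
        by_cases hdl : d = last
        · subst hdl
          rw [if_pos rfl] at hchild
          obtain ⟨ds, hlen, hnd, hb, hre, hv⟩ := (ih (value * 10 + d) d (run + 1) hasPair n).mp hchild
          refine ⟨d :: ds, by simp; omega, ⟨le_refl d, hnd⟩, ?_, ?_, by simpa [pvDsVal] using hv⟩
          · intro e he
            rcases List.mem_cons.mp he with rfl | he
            · omega
            · exact hb e he
          · rw [pvRunEnd, if_pos rfl]
            exact hre
        · rw [if_neg hdl] at hchild
          obtain ⟨ds, hlen, hnd, hb, hre, hv⟩ :=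
            (ih (value * 10 + d) d 1 (hasPair || run == 2) n).mp hchild
          refine ⟨d :: ds, by simp; omega, ⟨hdmem.1, hnd⟩, ?_, ?_, by simpa [pvDsVal] using hv⟩
          · intro e he
            rcases List.mem_cons.mp he with rfl | he
            · omega
            · exact hb e he
          · rw [pvRunEnd, if_neg hdl]
            exact hre
    · rintro ⟨ds, hlen, hnd, hb, hre, rfl⟩
      cases ds with
      | nil =>
        left
        rw [pvRunEnd] at hre
        rw [if_pos hre]
        simp [pvDsVal]
      | cons d ds' =>
        right
        have hd9 : d ≤ 9 := hb d (by simp)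
        refine ⟨d, by rw [PySem.List.mem_pyRange_one]; exact ⟨hnd.1, by omega⟩, ?_⟩
        by_cases hdl : d = last
        · subst hdl
          rw [if_pos rfl]
          rw [pvRunEnd, if_pos rfl] at hre
          exact (ih (value * 10 + d) d (run + 1) hasPair _).mpr
            ⟨ds', by simp at hlen; omega, hnd.2, fun e he => hb e (by simp [he]), hre, rfl⟩
        · rw [if_neg hdl]
          rw [pvRunEnd, if_neg hdl] at hre
          exact (ih (value * 10 + d) d 1 (hasPair || run == 2) _).mpr
            ⟨ds', by simp at hlen; omega, hnd.2, fun e he => hb e (by simp [he]), hre, rfl⟩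

theorem mem_pvGL (n : Int) :
    n ∈ pvGL ↔ ∃ d ds, 1 ≤ d ∧ d ≤ 9 ∧ (ds : List Int).length ≤ 9 ∧ pvNdec d ds ∧
      (∀ x ∈ ds, x ≤ 9) ∧ pvRunEnd d 1 false ds = true ∧ n = pvDsVal d ds := by
  unfold pvGL
  rw [List.mem_flatMap]
  constructor
  · rintro ⟨d, hdmem, hmem⟩
    rw [PySem.List.mem_pyRange_one] at hdmem
    obtain ⟨ds, hlen, hnd, hb, hre, hv⟩ := (mem_pvBList 9 d d 1 false n).mp hmem
    exact ⟨d, ds, hdmem.1, by omega, hlen, hnd, hb, hre, hv⟩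
  · rintro ⟨d, ds, h1, h9, hlen, hnd, hb, hre, rfl⟩
    refine ⟨d, by rw [PySem.List.mem_pyRange_one]; exact ⟨h1, by omega⟩, ?_⟩
    exact (mem_pvBList 9 d d 1 false _).mpr ⟨ds, hlen, hnd, hb, hre, rfl⟩

-- ---- digit/value arithmetic ----

theorem pvDsVal_snoc (d : Int) : ∀ (ds : List Int) (v : Int),
    pvDsVal v (ds ++ [d]) = pvDsVal v ds * 10 + d := by
  intro ds
  induction ds with
  | nil => intro v; rfl
  | cons e ds ih => intro v; simpa [pvDsVal] using ih (v * 10 + e)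

theorem pvDsVal_ge_start : ∀ (ds : List Int) (v : Int), 0 ≤ v → (∀ d ∈ ds, 0 ≤ d) →
    v ≤ pvDsVal v ds := by
  intro ds
  induction ds with
  | nil => intro v hv _; exact le_refl v
  | cons e ds ih =>
    intro v hv hd
    have he : 0 ≤ e := hd e (by simp)
    have h1 : 0 ≤ v * 10 + e := by omega
    have h2 := ih (v * 10 + e) h1 (fun d hdm => hd d (by simp [hdm]))
    calc v ≤ v * 10 + e := by omega
    _ ≤ pvDsVal (v * 10 + e) ds := h2

theorem pvNdec_ge : ∀ (ds : List Int) (last : Int), pvNdec last ds → ∀ d ∈ ds, last ≤ d := by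
  intro ds
  induction ds with
  | nil => intro last _ d hd; simp at hd
  | cons e ds ih =>
    intro last h d hd
    obtain ⟨h1, h2⟩ := h
    rcases List.mem_cons.mp hd with rfl | hd
    · exact h1
    · exact le_trans h1 (ih e h2 d hd)

/-- digits of a value extended by digits: decimal representation (little-endian Nat form) -/
theorem pvPhi : ∀ (ds : List Int) (value : Int), 0 < value → (∀ d ∈ ds, 0 ≤ d ∧ d < 10) →
    Nat.digits 10 (pvDsVal value ds).toNat
      = (ds.reverse.map Int.toNat) ++ Nat.digits 10 value.toNat := by
  intro ds
  induction ds with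
  | nil => intro value _ _; simp [pvDsVal]
  | cons d ds ih =>
    intro value hv hd
    obtain ⟨hd0, hd10⟩ := hd d (by simp)
    have hv' : 0 < value * 10 + d := by omega
    have step : Nat.digits 10 (value * 10 + d).toNat = d.toNat :: Nat.digits 10 value.toNat := by
      have htn : (value * 10 + d).toNat = value.toNat * 10 + d.toNat := by omega
      rw [htn, Nat.digits_def' (by norm_num : (1:Nat) < 10) (by omega)]
      congr 1
      · omega
      · congr 1; omega
    have := ih (value * 10 + d) hv' (fun e he => hd e (by simp [he]))
    simp only [pvDsVal]
    rw [this, step, List.reverse_cons, List.map_append]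
    simp

theorem pvDsVal_digits : ∀ (m : Nat), pvDsVal 0 (((Nat.digits 10 m).reverse).map (fun d : Nat => (d : Int))) = (m : Int) := by
  intro m
  induction m using Nat.strong_induction_on with
  | _ m ih =>
    rcases Nat.eq_zero_or_pos m with rfl | hm
    · simp [pvDsVal]
    · rw [Nat.digits_def' (by norm_num : (1:Nat) < 10) hm]
      have hlt : m / 10 < m := Nat.div_lt_self hm (by norm_num)
      rw [List.reverse_cons, List.map_append]
      simp only [List.map_cons, List.map_nil]
      rw [pvDsVal_snoc, ih (m / 10) hlt]
      have := Nat.div_add_mod m 10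
      push_cast
      omega

theorem pvMem_shape (r : Nat) (value last run : Int) (hasPair : Bool) (n : Int)
    (hv : 0 < value) (hl1 : 1 ≤ last)
    (hmem : n ∈ pvBList value last run hasPair r) :
    ∃ ds : List Int, (∀ d ∈ ds, 1 ≤ d ∧ d < 10) ∧ n = pvDsVal value ds ∧
      Nat.digits 10 n.toNat = (ds.reverse.map Int.toNat) ++ Nat.digits 10 value.toNat := by
  obtain ⟨ds, _, hnd, hb, _, rfl⟩ := (mem_pvBList r value last run hasPair n).mp hmem
  have hdig : ∀ d ∈ ds, 1 ≤ d ∧ d < 10 := fun d hd =>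
    ⟨le_trans hl1 (pvNdec_ge ds last hnd d hd), by have := hb d hd; omega⟩
  exact ⟨ds, hdig, rfl,
    pvPhi ds value hv (fun d hd => ⟨by have := (hdig d hd).1; omega, (hdig d hd).2⟩)⟩

theorem pvChild_digits (r : Nat) (value d run : Int) (hasPair : Bool) (n : Int)
    (hv : 0 < value) (hd1 : 1 ≤ d) (hd9 : d < 10)
    (hmem : n ∈ pvBList (value * 10 + d) d run hasPair r) :
    ∃ tail : List Nat,
      Nat.digits 10 n.toNat = (tail ++ [d.toNat]) ++ Nat.digits 10 value.toNat := by
  obtain ⟨ds, hdig, rfl, hphi⟩ :=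
    pvMem_shape r (value * 10 + d) d run hasPair n (by omega) hd1 hmem
  have hstep : Nat.digits 10 (value * 10 + d).toNat = d.toNat :: Nat.digits 10 value.toNat := by
    have htn : (value * 10 + d).toNat = value.toNat * 10 + d.toNat := by omega
    rw [htn, Nat.digits_def' (by norm_num : (1:Nat) < 10) (by omega)]
    congr 1
    · omega
    · congr 1
      omega
  refine ⟨ds.reverse.map Int.toNat, ?_⟩
  rw [hphi, hstep]
  simp

theorem pvChild_gt (r : Nat) (value d run : Int) (hasPair : Bool) (n : Int)
    (hv : 0 ≤ value) (hd1 : 1 ≤ d)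
    (hmem : n ∈ pvBList (value * 10 + d) d run hasPair r) : value < n := by
  obtain ⟨ds, _, hnd, _, _, rfl⟩ := (mem_pvBList r (value * 10 + d) d run hasPair n).mp hmem
  have := pvDsVal_ge_start ds (value * 10 + d) (by omega)
    (fun e he => by have := pvNdec_ge ds d hnd e he; omega)
  omega

theorem nodup_pvBList : ∀ (r : Nat) (value last run : Int) (hasPair : Bool),
    0 < value → 1 ≤ last → (pvBList value last run hasPair r).Nodup := by
  intro r
  induction r with
  | zero =>
    intro value last run hasPair hv hl
    rw [pvBList]
    by_cases hp : (hasPair || run == 2) = true <;> simp [hp]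
  | succ r ih =>
    intro value last run hasPair hv hl
    rw [pvBList]
    apply List.Nodup.append
    · by_cases hp : (hasPair || run == 2) = true <;> simp [hp]
    · rw [List.nodup_flatMap]
      refine ⟨?_, ?_⟩
      · intro d hdmem
        rw [PySem.List.mem_pyRange_one] at hdmem
        by_cases hdl : d = last
        · rw [if_pos hdl]
          exact ih (value * 10 + d) d (run + 1) hasPair (by omega) (by omega)
        · rw [if_neg hdl]
          exact ih (value * 10 + d) d 1 (hasPair || run == 2) (by omega) (by omega)
      · apply List.Nodup.pairwise_of_forall_ne (PySem.List.nodup_pyRange_one last 10)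
        intro d hdm d' hdm' hne
        rw [PySem.List.mem_pyRange_one] at hdm hdm'
        simp only [Function.onFun]
        intro n hn hn'
        have hx1 : ∃ run' hasPair', n ∈ pvBList (value * 10 + d) d run' hasPair' r := by
          by_cases hdl : d = last
          · rw [if_pos hdl] at hn; exact ⟨_, _, hn⟩
          · rw [if_neg hdl] at hn; exact ⟨_, _, hn⟩
        have hx2 : ∃ run' hasPair', n ∈ pvBList (value * 10 + d') d' run' hasPair' r := by
          by_cases hdl : d' = last
          · rw [if_pos hdl] at hn'; exact ⟨_, _, hn'⟩
          · rw [if_neg hdl] at hn'; exact ⟨_, _, hn'⟩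
        obtain ⟨r1, p1, h1⟩ := hx1
        obtain ⟨r2, p2, h2⟩ := hx2
        obtain ⟨t1, ht1⟩ := pvChild_digits r value d r1 p1 n hv (by omega) (by omega) h1
        obtain ⟨t2, ht2⟩ := pvChild_digits r value d' r2 p2 n hv (by omega) (by omega) h2
        rw [ht1] at ht2
        have hcanc := List.append_cancel_right ht2
        have hlast := congrArg List.getLast? hcanc
        rw [List.getLast?_concat, List.getLast?_concat] at hlast
        have : d.toNat = d'.toNat := by simpa using hlast
        exact hne (by omega)
    · intro a ha hb
      by_cases hp : (hasPair || run == 2) = true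
      · rw [if_pos hp] at ha
        simp only [List.mem_singleton] at ha
        rw [List.mem_flatMap] at hb
        obtain ⟨d, hdm, hmem⟩ := hb
        rw [PySem.List.mem_pyRange_one] at hdm
        have hgt : value < a := by
          by_cases hdl : d = last
          · rw [if_pos hdl] at hmem
            exact pvChild_gt r value d _ _ a (by omega) (by omega) hmem
          · rw [if_neg hdl] at hmem
            exact pvChild_gt r value d _ _ a (by omega) (by omega) hmem
        omega
      · rw [if_neg hp] at ha
        simp at ha

theorem pvDigits_single (a : Nat) (h1 : 0 < a) (h2 : a < 10) : Nat.digits 10 a = [a] := by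
  rw [Nat.digits_def' (by norm_num : (1:Nat) < 10) h1]
  have hm : a % 10 = a := by omega
  have h0 : a / 10 = 0 := by omega
  rw [hm, h0, Nat.digits_zero]

theorem pvTop_digits (r : Nat) (d run : Int) (hasPair : Bool) (n : Int)
    (hd1 : 1 ≤ d) (hd9 : d ≤ 9) (hmem : n ∈ pvBList d d run hasPair r) :
    ∃ tail : List Nat, Nat.digits 10 n.toNat = tail ++ [d.toNat] := by
  obtain ⟨ds, hdig, rfl, hphi⟩ := pvMem_shape r d d run hasPair n (by omega) hd1 hmem
  refine ⟨ds.reverse.map Int.toNat, ?_⟩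
  rw [hphi, pvDigits_single d.toNat (by omega) (by omega)]

theorem nodup_pvGL : pvGL.Nodup := by
  unfold pvGL
  rw [List.nodup_flatMap]
  refine ⟨?_, ?_⟩
  · intro d hdm
    rw [PySem.List.mem_pyRange_one] at hdm
    exact nodup_pvBList 9 d d 1 false (by omega) (by omega)
  · apply List.Nodup.pairwise_of_forall_ne (PySem.List.nodup_pyRange_one 1 10)
    intro d hdm d' hdm' hne
    rw [PySem.List.mem_pyRange_one] at hdm hdm'
    simp only [Function.onFun]
    intro n hn hn'
    obtain ⟨t1, ht1⟩ := pvTop_digits 9 d 1 false n (by omega) (by omega) hn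
    obtain ⟨t2, ht2⟩ := pvTop_digits 9 d' 1 false n (by omega) (by omega) hn'
    rw [ht1] at ht2
    have hlast := congrArg List.getLast? ht2
    rw [List.getLast?_concat, List.getLast?_concat] at hlast
    have : d.toNat = d'.toNat := by simpa using hlast
    exact hne (by omega)

-- ---- A-side: the two helper loops on digit strings ----

theorem pvCharInt_digitChar : ∀ a : Nat, a < 10 → pvCharInt (Nat.digitChar a) = (a : Int) := by
  decide

theorem pvDigitChar_inj : ∀ a : Nat, a < 10 → ∀ b : Nat, b < 10 →
    (Nat.digitChar a = Nat.digitChar b ↔ a = b) := by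
  decide

theorem pvToDigitsCore_eq : ∀ (f m : Nat) (ds : List Char), 0 < m → m < f →
    Nat.toDigitsCore 10 f m ds = ((Nat.digits 10 m).reverse).map Nat.digitChar ++ ds := by
  intro f
  induction f with
  | zero => intro m ds hm hf; omega
  | succ f ih =>
    intro m ds hm hf
    simp only [Nat.toDigitsCore]
    by_cases h0 : m / 10 = 0
    · rw [if_pos h0]
      rw [Nat.digits_def' (by norm_num : (1:Nat) < 10) hm, h0, Nat.digits_zero]
      have : m % 10 = m := by omega
      simp [this]
    · rw [if_neg h0]
      have h1 : 0 < m / 10 := Nat.pos_of_ne_zero h0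
      have h2 : m / 10 < f := by
        have := Nat.div_lt_self hm (by norm_num : 1 < 10)
        omega
      rw [ih (m / 10) (Nat.digitChar (m % 10) :: ds) h1 h2]
      rw [Nat.digits_def' (by norm_num : (1:Nat) < 10) hm]
      simp

theorem pvToChars_eq (n : Int) (hn : 1 ≤ n) :
    PySem.Int.toChars n = (pvDigits n).map pvCharOf := by
  have hneg : ¬ n < 0 := by omega
  have hm : 0 < n.toNat := by omega
  simp only [PySem.Int.toChars, if_neg hneg]
  rw [Nat.toDigits, pvToDigitsCore_eq (n.toNat + 1) n.toNat [] hm (by omega)]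
  simp [pvDigits, pvCharOf, List.map_map, Function.comp_def]

theorem pvHt_runEnd : ∀ (ds : List Int), (∀ d ∈ ds, 0 ≤ d ∧ d < 10) →
    ∀ (last : Int), 0 ≤ last → last < 10 → ∀ (part : List Char), part ≠ [] →
    pvHtLoop (ds.map pvCharOf) part (some (pvCharOf last))
      = pvRunEnd last (part.length : Int) false ds := by
  intro ds
  induction ds with
  | nil =>
    intro _ last _ _ part _
    simp only [List.map_nil, pvHtLoop, pvRunEnd, Bool.false_or]
    have h' : ((part.length : Int) = 2) ↔ part.length = 2 := by omega
    by_cases h : part.length = 2 <;> simp [h, h']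
  | cons d rest ih =>
    intro hds last h0 h10 part hpart
    obtain ⟨hd0, hd10⟩ := hds d (by simp)
    have hrest : ∀ e ∈ rest, 0 ≤ e ∧ e < 10 := fun e he => hds e (by simp [he])
    simp only [List.map_cons, pvHtLoop]
    by_cases heq : d = last
    · subst heq
      rw [if_neg (by simp)]
      have hstep : pvRunEnd d ((part.length : Int)) false (d :: rest)
          = pvRunEnd d ((part.length : Int) + 1) false rest := by
        simp [pvRunEnd]
      rw [hstep, ih hrest d hd0 hd10 (part ++ [pvCharOf d]) (by simp)]
      congr 1
      simp only [List.length_append, List.length_cons, List.length_nil]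
      push_cast
      ring
    · have hne : pvCharOf last ≠ pvCharOf d := by
        intro hc
        apply heq
        have := (pvDigitChar_inj last.toNat (by omega) d.toNat (by omega)).mp
          (by simpa [pvCharOf] using hc)
        omega
      rw [if_pos (by simpa using hne)]
      simp only [pvRunEnd, if_neg heq, Bool.false_or]
      by_cases hl : part.length = 2
      · rw [if_pos (by simp [hl])]
        have h2 : (((part.length : Int)) == 2) = true := by simp [hl]
        rw [h2, pvRunEnd_true]
      · rw [if_neg (by simp [hl])]
        have h2 : (((part.length : Int)) == 2) = false := by
          simp only [beq_eq_false_iff_ne, ne_eq]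
          omega
        rw [h2]
        have := ih hrest d hd0 hd10 [pvCharOf d] (by simp)
        rw [this]
        simp

theorem pvPos_of_digits (n : Int) (d0 : Int) (rest : List Int)
    (h : pvDigits n = d0 :: rest) : 1 ≤ n := by
  rcases Nat.eq_zero_or_pos n.toNat with h0 | h0
  · exfalso
    have hnil : pvDigits n = [] := by simp [pvDigits, h0]
    rw [hnil] at h
    cases h
  · omega

theorem pvHt_entry (n : Int) (d0 : Int) (rest : List Int)
    (h : pvDigits n = d0 :: rest) (hn : 0 ≤ n)
    (hd : ∀ d ∈ d0 :: rest, 0 ≤ d ∧ d < 10) :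
    has_twice_repeated_digit n = pvRunEnd d0 1 false rest := by
  have hn1 : 1 ≤ n := pvPos_of_digits n d0 rest h
  unfold has_twice_repeated_digit
  rw [pvToChars_eq n hn1, h]
  simp only [List.map_cons]
  rw [show pvHtLoop (pvCharOf d0 :: List.map pvCharOf rest) [] none
        = pvHtLoop (List.map pvCharOf rest) [pvCharOf d0] (some (pvCharOf d0)) from by
      simp [pvHtLoop]]
  have h0 := hd d0 (by simp)
  have := pvHt_runEnd rest (fun e he => hd e (by simp [he])) d0 h0.1 h0.2 [pvCharOf d0] (by simp)
  simpa using this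

theorem pvSi_iff : ∀ (idxs : List Int) (s : List Char),
    pvSiLoop s idxs = true ↔
      ∀ i ∈ idxs, ¬ (((PySem.List.pyGet? s i).elim 0 pvCharInt) > ((PySem.List.pyGet? s (i + 1)).elim 0 pvCharInt)) := by
  intro idxs
  induction idxs with
  | nil => intro s; simp [pvSiLoop]
  | cons i idxs ih =>
    intro s
    by_cases h : ((PySem.List.pyGet? s i).elim 0 pvCharInt) > ((PySem.List.pyGet? s (i + 1)).elim 0 pvCharInt)
    · simp [pvSiLoop, h]
    · simp only [pvSiLoop, if_neg h]
      rw [ih s]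
      simp only [List.mem_cons]
      constructor
      · rintro hall j (rfl | hj)
        · exact h
        · exact hall j hj
      · intro hall j hj
        exact hall j (Or.inr hj)

theorem pvNdec_iff_getElem : ∀ (L : List Int) (d : Int),
    pvNdec d L ↔ ∀ (k : Nat) (hk : k + 1 < (d :: L).length),
      (d :: L)[k]'(by omega) ≤ (d :: L)[k + 1]'hk := by
  intro L
  induction L with
  | nil =>
    intro d
    constructor
    · intro _ k hk
      simp at hk
    · intro _
      trivial
  | cons e L ih =>
    intro d
    constructor
    · rintro ⟨h1, h2⟩ k hk
      match k with
      | 0 => simpa using h1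
      | (k + 1) =>
        have := (ih e).mp h2 k (by simpa using hk)
        simpa using this
    · intro hall
      refine ⟨by simpa using hall 0 (by simp), (ih e).mpr ?_⟩
      intro k hk
      have := hall (k + 1) (by simpa using hk)
      simpa using this

theorem pvSi_ndec (n : Int) (d0 : Int) (rest : List Int)
    (h : pvDigits n = d0 :: rest) (hn : 0 ≤ n)
    (hd : ∀ d ∈ d0 :: rest, 0 ≤ d ∧ d < 10) :
    (strictly_increasing n = true ↔ pvNdec d0 rest) := by
  have hn1 : 1 ≤ n := pvPos_of_digits n d0 rest h
  have hsi : strictly_increasing n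
      = pvSiLoop ((d0 :: rest).map pvCharOf)
          (PySem.List.pyRange 0 (((((d0 :: rest).map pvCharOf)).length : Int) - 1)) := by
    unfold strictly_increasing
    rw [pvToChars_eq n hn1, h]
  have hlen : ((d0 :: rest).map pvCharOf).length = (d0 :: rest).length := by
    simp
  have hget : ∀ (k : Nat) (hk : k < (d0 :: rest).length),
      (PySem.List.pyGet? ((d0 :: rest).map pvCharOf) (k : Int)).elim 0 pvCharInt
        = (d0 :: rest)[k] := by
    intro k hk
    rw [PySem.List.pyGet?_natCast, List.getElem?_map, List.getElem?_eq_getElem hk]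
    simp only [Option.map_some, Option.elim]
    obtain ⟨hx0, hx10⟩ := hd _ (List.getElem_mem hk)
    have hci := pvCharInt_digitChar ((d0 :: rest)[k]).toNat (by omega)
    simp only [pvCharOf]
    rw [hci]
    omega
  rw [hsi, pvSi_iff, pvNdec_iff_getElem]
  constructor
  · intro hall k hk
    have hkmem : ((k : Nat) : Int) ∈ PySem.List.pyRange 0 ((((d0 :: rest).map pvCharOf).length : Int) - 1) := by
      rw [PySem.List.mem_pyRange_one]
      constructor
      · exact_mod_cast k.zero_le
      · rw [hlen]
        omega
    have h1 := hall _ hkmem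
    rw [hget k (by omega)] at h1
    rw [show ((k : Nat) : Int) + 1 = (((k + 1 : Nat)) : Int) by push_cast; ring] at h1
    rw [hget (k + 1) (by omega)] at h1
    omega
  · intro hnd i hi
    rw [PySem.List.mem_pyRange_one] at hi
    obtain ⟨hi0, hi1⟩ := hi
    rw [hlen] at hi1
    have hik : i = ((i.toNat : Nat) : Int) := by omega
    rw [hik, hget i.toNat (by omega)]
    rw [show ((i.toNat : Nat) : Int) + 1 = (((i.toNat + 1 : Nat)) : Int) by push_cast; ring]
    rw [hget (i.toNat + 1) (by omega)]
    have := hnd i.toNat (by omega)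
    omega


-- ---- the central membership equivalence ----

theorem pvCentral (n : Int) (h1 : -10 ≤ n) (h2 : n ≤ 2147483648) :
    (pvPred n = true ↔ n ∈ pvGL) := by
  by_cases hsmall : n ≤ 9
  · constructor
    · intro hp
      exfalso
      interval_cases n <;> exact absurd hp (by decide)
    · intro hmem
      exfalso
      obtain ⟨d, ds, hd1, hd9, hlen, hnd, hb, hre, rfl⟩ := (mem_pvGL _).mp hmem
      cases ds with
      | nil => simp [pvRunEnd] at hre
      | cons e ds' =>
        have he : d ≤ e := hnd.1
        have hge := pvDsVal_ge_start ds' (d * 10 + e) (by omega)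
          (fun x hx => by have := pvNdec_ge ds' e hnd.2 x hx; omega)
        simp only [pvDsVal] at hsmall
        omega
  · push Not at hsmall
    have hnn : 0 ≤ n := by omega
    have hm10 : 10 ≤ n.toNat := by omega
    have hDne : Nat.digits 10 n.toNat ≠ [] := by
      rw [Nat.digits_ne_nil_iff_ne_zero]
      omega
    have hLne : pvDigits n ≠ [] := by
      simp only [pvDigits, ne_eq, List.map_eq_nil_iff, List.reverse_eq_nil_iff]
      exact hDne
    obtain ⟨d0, rest, hL⟩ := List.exists_cons_of_ne_nil hLne
    have hdall : ∀ d ∈ d0 :: rest, 0 ≤ d ∧ d < 10 := by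
      intro d hd
      rw [← hL] at hd
      simp only [pvDigits, List.mem_map, List.mem_reverse] at hd
      obtain ⟨x, hx, rfl⟩ := hd
      have := Nat.digits_lt_base (by norm_num) hx
      omega
    have hd0pos : 1 ≤ d0 := by
      have hh : (pvDigits n).head? = some d0 := by rw [hL]; rfl
      rw [pvDigits, List.head?_map, List.head?_reverse] at hh
      rw [List.getLast?_eq_some_getLast hDne] at hh
      have hne0 := Nat.getLast_digit_ne_zero 10 (m := n.toNat) (by omega)
      simp only [Option.map_some, Option.some.injEq] at hh
      have h0 := hdall d0 (by simp)
      omega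
    have hlen10 : (d0 :: rest).length ≤ 10 := by
      have hLl : (pvDigits n).length = (Nat.digits 10 n.toNat).length := by
        simp [pvDigits]
      rw [← hL, hLl]
      rw [Nat.digits_length_le_iff (by norm_num : (1:Nat) < 10)]
      omega
    have hval : pvDsVal d0 rest = n := by
      have hv0 := pvDsVal_digits n.toNat
      rw [show ((Nat.digits 10 n.toNat).reverse).map (fun d : Nat => (d : Int)) = pvDigits n from rfl, hL] at hv0
      simp only [pvDsVal] at hv0
      rw [show (0 : Int) * 10 + d0 = d0 by ring] at hv0
      rw [hv0]
      omega
    constructor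
    · intro hp
      have hht := pvHt_entry n d0 rest hL hnn hdall
      have hsi := pvSi_ndec n d0 rest hL hnn hdall
      unfold pvPred at hp
      rw [Bool.and_eq_true] at hp
      rw [mem_pvGL]
      refine ⟨d0, rest, hd0pos, by have := hdall d0 (by simp); omega, ?_, hsi.mp hp.2, ?_, ?_, hval.symm⟩
      · simp only [List.length_cons] at hlen10
        omega
      · intro x hx
        have := hdall x (by simp [hx])
        omega
      · rw [← hht]
        exact hp.1
    · intro hmem
      obtain ⟨d, ds, hd1, hd9, hlen, hnd, hb, hre, hveq⟩ := (mem_pvGL _).mp hmem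
      have hdigall : ∀ x ∈ ds, 0 ≤ x ∧ x < 10 := fun x hx =>
        ⟨by have := pvNdec_ge ds d hnd x hx; omega, by have := hb x hx; omega⟩
      have hphi := pvPhi ds d (by omega) hdigall
      have hdig : Nat.digits 10 n.toNat = (ds.reverse.map Int.toNat) ++ [d.toNat] := by
        rw [hveq, hphi, pvDigits_single d.toNat (by omega) (by omega)]
      have hpd : pvDigits n = d :: ds := by
        rw [pvDigits, hdig]
        simp only [List.reverse_append, List.reverse_singleton, List.singleton_append,
          List.map_cons, List.map_reverse, List.reverse_reverse, List.map_map]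
        congr 1
        · exact Int.toNat_of_nonneg (by omega)
        · calc ds.map ((fun x : Nat => (x : Int)) ∘ Int.toNat) = ds.map id := by
                apply List.map_congr_left
                intro x hx
                have := hdigall x hx
                simp only [Function.comp_apply, id_eq]
                omega
            _ = ds := List.map_id ds
      rw [hL] at hpd
      injection hpd with he1 he2
      subst he1
      subst he2
      unfold pvPred
      rw [Bool.and_eq_true]
      refine ⟨?_, ?_⟩
      · rw [pvHt_entry n d0 rest hL hnn hdall]
        exact hre
      · exact (pvSi_ndec n d0 rest hL hnn hdall).mpr hnd

-- ---- assembly ----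

theorem pvMain (lower upper : Int) (hdom : Dom_valid_passwords lower upper)
    (hpre : Pre_valid_passwords lower upper) :
    valid_passwords lower upper = valid_passwords_alt lower upper := by
  have hA : valid_passwords lower upper
      = (((PySem.List.pyRange lower (upper + 1)).filter pvPred).length : Int) := rfl
  simp only [Dom_valid_passwords, pvDomInt, Bool.and_eq_true, decide_eq_true_eq] at hdom
  obtain ⟨⟨hl1, hl2⟩, hu1, hu2⟩ := hdom
  rcases hpre with hpl | hul
  · rw [hA, pvAlt_eq_filter]
    have hn1 : ((PySem.List.pyRange lower (upper + 1)).filter pvPred).Nodup :=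
      (PySem.List.nodup_pyRange_one lower (upper + 1)).filter _
    have hn2 : (pvGL.filter (pvInRange lower upper)).Nodup := nodup_pvGL.filter _
    have hiff : ∀ a, a ∈ (PySem.List.pyRange lower (upper + 1)).filter pvPred
        ↔ a ∈ pvGL.filter (pvInRange lower upper) := by
      intro a
      rw [List.mem_filter, List.mem_filter, PySem.List.mem_pyRange_one]
      constructor
      · rintro ⟨⟨hal, hau⟩, hpa⟩
        refine ⟨(pvCentral a (by omega) (by omega)).mp hpa, ?_⟩
        simp only [pvInRange, Bool.and_eq_true, decide_eq_true_eq]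
        omega
      · rintro ⟨hmem, hr⟩
        simp only [pvInRange, Bool.and_eq_true, decide_eq_true_eq] at hr
        exact ⟨⟨by omega, by omega⟩, (pvCentral a (by omega) (by omega)).mpr hmem⟩
    have hperm := (List.perm_ext_iff_of_nodup hn1 hn2).mpr hiff
    rw [hperm.length_eq]
  · rw [hA, pvAlt_eq_filter]
    rw [PySem.List.pyRange_one_eq_nil (by omega)]
    have hnil : pvGL.filter (pvInRange lower upper) = [] := by
      rw [List.filter_eq_nil_iff]
      intro a _
      simp only [pvInRange, Bool.and_eq_true, decide_eq_true_eq]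
      omega
    rw [hnil]
    simp

-- ===== VERDICT (by name: the statement is the Claim_ definition above) =====
theorem valid_passwords_spec : Claim_equal_valid_passwords := by
  intro lower upper hdom hpre
  unfold Spec_valid_passwords
  exact pvMain lower upper hdom hpre
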